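-- pv_equiv track=rewrite | github.com/rnerurkar/mcp-implementation | ADK MCP/agent_security_controls.py | _has_repetitive_patterns
-- ===== SOURCE A (Python) =====
-- def _has_repetitive_patterns(message: str) -> bool:
--     """Check for repetitive patterns that might indicate obfuscation"""
--     words = message.lower().split()
--     if len(words) < 4:
--         return False
--
--     # Check for repeated phrases
--     word_count = {}
--     for word in words:
--         word_count[word] = word_count.get(word, 0) + 1
--
--     # If any word appears more than 3 times, consider it repetitive
--     return any(count > 3 for count in word_count.values())
-- ===== SOURCE B (Python) =====
-- def _has_repetitive_patterns(message: str) -> bool: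
--     """Check for repetitive patterns that might indicate obfuscation"""
--     words = sorted(message.lower().split())
--     if not words:
--         return False
--     prev = words[0]
--     run = 1
--     for w in words[1:]:
--         if w == prev:
--             run += 1
--         else:
--             prev = w
--             run = 1
--         if run > 3:
--             return True
--     return False
-- ===== Notes on version B (the rewrite author's own statement) =====
-- stated objective: alternative
-- what changed: Replaced the dict frequency table plus any() over counts by sorting the words and a single run-length scan over consecutive equal words with early exit (the len<4 guard is dropped as redundant).
import Mathlib
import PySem

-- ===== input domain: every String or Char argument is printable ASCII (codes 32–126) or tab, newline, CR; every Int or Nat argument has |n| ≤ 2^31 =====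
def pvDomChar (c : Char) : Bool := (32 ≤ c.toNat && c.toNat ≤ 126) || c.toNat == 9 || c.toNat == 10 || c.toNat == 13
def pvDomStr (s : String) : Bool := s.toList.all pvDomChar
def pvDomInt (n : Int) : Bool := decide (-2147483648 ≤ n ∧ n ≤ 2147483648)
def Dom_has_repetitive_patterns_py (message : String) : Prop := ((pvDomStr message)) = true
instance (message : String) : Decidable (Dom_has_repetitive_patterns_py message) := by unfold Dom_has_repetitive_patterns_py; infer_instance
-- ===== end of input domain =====

-- B replaces A's dict frequency table by sort + one run-length scan over consecutive equal words; same result.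

-- ===== PORT A =====
def has_repetitive_patterns_py (message : String) : Bool :=
  let words := PySem.Str.split₀ (PySem.Str.lower message)
  if words.length < 4 then false
  else
    let word_count := words.foldl (fun d w => d.insert w (d.getD w 0 + 1)) (PySem.Dict.empty : PySem.Dict String Int)
    word_count.values.any (fun count => count > 3)

-- ===== PORT B =====
-- run-length scan over the (sorted) remaining words; returns true as soon as a run exceeds 3
def pvRunScan : String → Nat → List String → Bool
  | _, _, [] => false
  | prev, run, w :: ws =>
    let run' := if w = prev then run + 1 else 1
    if run' > 3 then true else pvRunScan w run' ws

def has_repetitive_patterns_py_alt (message : String) : Bool :=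
  match PySem.List.sorted (PySem.Str.split₀ (PySem.Str.lower message)) (fun x => x) false with
  | [] => false
  | w :: ws => pvRunScan w 1 ws

-- ===== PRECONDITION & SPEC =====
def Spec_has_repetitive_patterns_py (message : String) (out : Bool) : Prop := out = has_repetitive_patterns_py_alt message
instance (message : String) (out : Bool) : Decidable (Spec_has_repetitive_patterns_py message out) := by unfold Spec_has_repetitive_patterns_py; infer_instance

-- ===== CLAIM (what is proved, stated in full; the proofs are below) =====
def Claim_equal_has_repetitive_patterns_py : Prop := ∀ (message : String), Dom_has_repetitive_patterns_py message → Spec_has_repetitive_patterns_py message (has_repetitive_patterns_py message)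

-- ===== LEMMAS AND PROOFS =====

-- A's result is: some word occurs more than 3 times (the length<4 guard is implied by count > 3).
theorem hrp_A_iff (message : String) :
    has_repetitive_patterns_py message = true ↔
      ∃ w ∈ PySem.Str.split₀ (PySem.Str.lower message),
        (PySem.Str.split₀ (PySem.Str.lower message)).count w > 3 := by
  unfold has_repetitive_patterns_py
  set words := PySem.Str.split₀ (PySem.Str.lower message) with hw
  have hc : words.foldl (fun d w => d.insert w (d.getD w 0 + 1)) (PySem.Dict.empty : PySem.Dict String Int)
      = PySem.Dict.counter words := PySem.Dict.foldl_insert_getD_add_one_eq_counter words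
  by_cases hlen : words.length < 4
  · simp only [hlen, if_true]
    constructor
    · intro h; exact absurd h (by simp)
    · rintro ⟨w, hwmem, hcount⟩
      have := List.count_le_length (l := words) (a := w)
      omega
  · simp only [hlen, if_false, hc]
    rw [PySem.Dict.values_eq_map_keys _ (PySem.Dict.nodup_keys_counter words) 0]
    rw [List.any_map, List.any_eq_true]
    constructor
    · rintro ⟨k, hk, hp⟩
      refine ⟨k, ?_, ?_⟩
      · have : k ∈ PySem.Set.ofList words := by
          rw [← PySem.Dict.keys_counter]; exact hk
        exact (PySem.Set.mem_ofList _ _).mp this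
      · simp only [Function.comp, PySem.Dict.getD_counter] at hp
        have : (3 : Int) < (words.count k : Int) := by
          simpa using of_decide_eq_true hp
        exact_mod_cast this
    · rintro ⟨w, hwmem, hcount⟩
      refine ⟨w, ?_, ?_⟩
      · rw [PySem.Dict.keys_counter]
        exact (PySem.Set.mem_ofList _ _).mpr hwmem
      · simp only [Function.comp, PySem.Dict.getD_counter]
        have : (3 : Int) < (words.count w : Int) := by exact_mod_cast hcount
        simpa using this
  
-- the run-length scan on a sorted list detects exactly a count exceeding 3
theorem pvRunScan_iff (prev : String) (run : Nat) (ws : List String)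
    (hrun : run ≤ 3) (hs : (prev :: ws).Pairwise (· ≤ ·)) :
    pvRunScan prev run ws = true ↔
      (run + ws.count prev > 3 ∨ ∃ w ∈ ws, w ≠ prev ∧ ws.count w > 3) := by
  induction ws generalizing prev run with
  | nil => simp [pvRunScan]; omega
  | cons w ws ih =>
    rcases List.pairwise_cons.mp hs with ⟨hle, hs'⟩
    have hlew : prev ≤ w := hle w (List.mem_cons_self)
    by_cases heq : w = prev
    · subst heq
      simp only [pvRunScan, if_true]
      by_cases h4 : run + 1 > 3
      · rw [if_pos h4]
        simp only [List.count_cons_self]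
        constructor
        · intro _; left; omega
        · intro _; trivial
      · rw [if_neg h4, ih w (run + 1) (by omega) hs']
        simp only [List.count_cons_self]
        constructor
        · rintro (h | ⟨v, hv, hne, hc⟩)
          · left; omega
          · right; exact ⟨v, List.mem_cons_of_mem _ hv, hne, by
              rwa [List.count_cons_of_ne (Ne.symm hne)]⟩
        · rintro (h | ⟨v, hv, hne, hc⟩)
          · left; omega
          · right
            rcases List.mem_cons.mp hv with h1 | h1
            · exact absurd h1 hne
            · exact ⟨v, h1, hne, by rwa [List.count_cons_of_ne (Ne.symm hne)] at hc⟩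
    · have hlt : prev < w := lt_of_le_of_ne hlew (fun h => heq h.symm)
      have hnozero : (w :: ws).count prev = 0 := by
        rw [List.count_eq_zero]
        intro hmem
        rcases List.mem_cons.mp hmem with h1 | h1
        · exact heq (h1.symm)
        · have : w ≤ prev := (List.pairwise_cons.mp hs').1 prev h1
          exact absurd (lt_of_lt_of_le hlt this) (lt_irrefl _)
      simp only [pvRunScan, if_neg heq]
      rw [if_neg (by omega), ih w 1 (by omega) hs']
      constructor
      · rintro (h | ⟨v, hv, hne, hc⟩)
        · right
          exact ⟨w, List.mem_cons_self, fun h' => heq h', by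
            rw [List.count_cons_self]; omega⟩
        · right
          refine ⟨v, List.mem_cons_of_mem _ hv, ?_, ?_⟩
          · intro h'
            subst h'
            have : w ≤ v := (List.pairwise_cons.mp hs').1 v hv
            exact absurd (lt_of_lt_of_le hlt this) (lt_irrefl _)
          · rwa [List.count_cons_of_ne (Ne.symm hne)]
      · rintro (h | ⟨v, hv, hne, hc⟩)
        · omega
        · rcases List.mem_cons.mp hv with h1 | h1
          · subst h1
            rw [List.count_cons_self] at hc
            left; omega
          · by_cases hvw : v = w
            · subst hvw
              rw [List.count_cons_self] at hc
              left; omega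
            · right
              exact ⟨v, h1, hvw, by rwa [List.count_cons_of_ne (Ne.symm hvw)] at hc⟩

-- B's result is the same existential statement
theorem hrp_B_iff (message : String) :
    has_repetitive_patterns_py_alt message = true ↔
      ∃ w ∈ PySem.Str.split₀ (PySem.Str.lower message),
        (PySem.Str.split₀ (PySem.Str.lower message)).count w > 3 := by
  unfold has_repetitive_patterns_py_alt
  set words := PySem.Str.split₀ (PySem.Str.lower message) with hw
  have hperm : (PySem.List.sorted words (fun x => x) false).Perm words :=
    PySem.List.sorted_perm words (fun x => x) false
  have hpw : (PySem.List.sorted words (fun x => x) false).Pairwise (· ≤ ·) := by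
    have := PySem.List.sorted_pairwise (xs := words) (key := fun x => x)
    simpa using this
  rcases hsorted : PySem.List.sorted words (fun x => x) false with _ | ⟨w, ws⟩
  · simp only
    have hempty : words = [] := by
      have := hperm
      rw [hsorted] at this
      exact (List.Perm.nil_eq this).symm
    simp [hempty]
  · rw [hsorted] at hperm hpw
    rw [pvRunScan_iff w 1 ws (by omega) hpw]
    have hcnt : ∀ v, (w :: ws).count v = words.count v := fun v => hperm.count_eq v
    have hmem : ∀ v, v ∈ (w :: ws) ↔ v ∈ words := fun v => hperm.mem_iff
    constructor
    · rintro (h | ⟨v, hv, _, hc⟩)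
      · refine ⟨w, (hmem w).mp List.mem_cons_self, ?_⟩
        rw [← hcnt w, List.count_cons_self]; omega
      · refine ⟨v, (hmem v).mp (List.mem_cons_of_mem _ hv), ?_⟩
        rw [← hcnt v]
        rcases eq_or_ne v w with h1 | h1
        · subst h1; rw [List.count_cons_self]; omega
        · rwa [List.count_cons_of_ne (Ne.symm h1)]
    · rintro ⟨v, hvmem, hc⟩
      rw [← hcnt v] at hc
      rcases List.mem_cons.mp ((hmem v).mpr hvmem) with h1 | h1
      · subst h1
        rw [List.count_cons_self] at hc
        left; omega
      · by_cases hvw : v = w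
        · subst hvw
          rw [List.count_cons_self] at hc
          left; omega
        · right
          exact ⟨v, h1, hvw, by rwa [List.count_cons_of_ne (Ne.symm hvw)] at hc⟩

-- ===== VERDICT (by name: the statement is the Claim_ definition above) =====
theorem has_repetitive_patterns_py_spec : Claim_equal_has_repetitive_patterns_py := by
  intro message _
  unfold Spec_has_repetitive_patterns_py
  cases hB : has_repetitive_patterns_py_alt message with
  | true => exact (hrp_A_iff message).mpr ((hrp_B_iff message).mp hB)
  | false =>
    cases hA : has_repetitive_patterns_py message with
    | false => rfl
    | true =>
      have := (hrp_B_iff message).mpr ((hrp_A_iff message).mp hA)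
      rw [hB] at this
      exact this.symm
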